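-- pv_equiv track=rewrite | github.com/apostolovbg/webcam-micro | devcovenant/core/gate_runtime.py | _visible_changelog_lines
-- ===== SOURCE A (Python) =====
-- _MANAGED_BEGIN = "<!-- DEVCOV:BEGIN -->"
--
-- _MANAGED_END = "<!-- DEVCOV:END -->"
--
-- _LOG_MARKER = "## Log changes here"
--
-- def _visible_changelog_lines(changelog_text: str) -> list[str]:
--     """Return changelog lines outside managed blocks and fenced examples."""
--     start = changelog_text.find(_LOG_MARKER)
--     content = changelog_text[start:] if start >= 0 else changelog_text
--     visible: list[str] = []
--     in_managed = False
--     in_fence = False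
--     for line in content.splitlines():
--         stripped = line.strip()
--         if stripped == _MANAGED_BEGIN:
--             in_managed = True
--             continue
--         if stripped == _MANAGED_END:
--             in_managed = False
--             continue
--         if in_managed:
--             continue
--         if stripped.startswith("```"):
--             in_fence = not in_fence
--             continue
--         if in_fence:
--             continue
--         visible.append(line)
--     return visible
-- ===== SOURCE B (Python) =====
-- _MANAGED_BEGIN = "<!-- DEVCOV:BEGIN -->"
--
-- _MANAGED_END = "<!-- DEVCOV:END -->"
--
-- _LOG_MARKER = "## Log changes here"
--
--
-- def _skip_managed(lines, i):
--     """Advance past a managed block: just past the next END marker (or the end)."""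
--     n = len(lines)
--     while i < n and lines[i].strip() != _MANAGED_END:
--         i += 1
--     return i + 1
--
--
-- def _visible_changelog_lines(changelog_text: str) -> list[str]:
--     """Index scanner: skip whole managed blocks / fenced examples as regions."""
--     start = changelog_text.find(_LOG_MARKER)
--     content = changelog_text[start:] if start >= 0 else changelog_text
--     lines = content.splitlines()
--     n = len(lines)
--     out = []
--     i = 0
--     while i < n:
--         s = lines[i].strip()
--         if s == _MANAGED_BEGIN:
--             i = _skip_managed(lines, i + 1)
--         elif s == _MANAGED_END:
--             i += 1
--         elif s.startswith("```"):
--             # inside a fenced example: skip lines until the closing fence,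
--             # still skipping managed blocks as whole regions
--             i += 1
--             while i < n:
--                 t = lines[i].strip()
--                 if t == _MANAGED_BEGIN:
--                     i = _skip_managed(lines, i + 1)
--                 elif t.startswith("```"):
--                     i += 1
--                     break
--                 else:
--                     i += 1
--         else:
--             out.append(lines[i])
--             i += 1
--     return out
-- ===== Notes on version B (the rewrite author's own statement) =====
-- stated objective: alternative
-- what changed: A's single foldl-style loop threading in_managed/in_fence boolean flags is replaced by an index scanner that, on hitting a marker or fence, skips the whole managed block or fenced region with dedicated inner skip loops (mutually recursive visible/fence modes in the port), carrying no boolean state.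
import Mathlib
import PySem

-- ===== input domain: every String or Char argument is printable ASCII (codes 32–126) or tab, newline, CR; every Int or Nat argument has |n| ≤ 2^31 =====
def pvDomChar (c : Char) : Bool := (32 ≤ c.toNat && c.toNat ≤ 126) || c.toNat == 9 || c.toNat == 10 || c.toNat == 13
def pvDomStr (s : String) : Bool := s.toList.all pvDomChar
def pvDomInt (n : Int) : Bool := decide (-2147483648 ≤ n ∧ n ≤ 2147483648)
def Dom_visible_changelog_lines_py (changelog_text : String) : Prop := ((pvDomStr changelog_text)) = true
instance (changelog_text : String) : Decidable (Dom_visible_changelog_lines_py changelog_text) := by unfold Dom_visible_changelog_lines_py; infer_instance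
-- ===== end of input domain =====

-- B replaces A's single flag-threading loop by a region scanner: managed blocks and
-- fenced examples are skipped as whole regions (two modes, no boolean state).
-- Objective: alternative decomposition, same cost.

-- ===== PORT A =====
-- one step of A's loop: state = (in_managed, in_fence, visible)
def pvStepA (st : Bool × Bool × List String) (line : String) : Bool × Bool × List String :=
  let stripped := PySem.Str.strip line
  if stripped = "<!-- DEVCOV:BEGIN -->" then (true, st.2.1, st.2.2)
  else if stripped = "<!-- DEVCOV:END -->" then (false, st.2.1, st.2.2)
  else if st.1 then st
  else if PySem.Str.startswith stripped "```" then (st.1, !st.2.1, st.2.2)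
  else if st.2.1 then st
  else (st.1, st.2.1, st.2.2 ++ [line])

def visible_changelog_lines_py (changelog_text : String) : List String :=
  let start := PySem.Str.find changelog_text "## Log changes here"
  let content := if start ≥ 0 then PySem.Str.slice changelog_text (some start) none else changelog_text
  ((PySem.Str.splitlines content).foldl pvStepA (false, false, [])).2.2

-- ===== PORT B =====
-- _skip_managed: drop lines up to and including the next END marker
def pvSkipEnd : List String → List String
  | [] => []
  | l :: rest => if PySem.Str.strip l = "<!-- DEVCOV:END -->" then rest else pvSkipEnd rest

theorem pvSkipEnd_le (ls : List String) : (pvSkipEnd ls).length ≤ ls.length := by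
  induction ls with
  | nil => simp [pvSkipEnd]
  | cons l rest ih =>
    simp only [pvSkipEnd, List.length_cons]
    split
    · omega
    · omega

mutual
-- visible mode (B's outer while loop)
def pvVis : List String → List String
  | [] => []
  | l :: rest =>
    if PySem.Str.strip l = "<!-- DEVCOV:BEGIN -->" then pvVis (pvSkipEnd rest)
    else if PySem.Str.strip l = "<!-- DEVCOV:END -->" then pvVis rest
    else if PySem.Str.startswith (PySem.Str.strip l) "```" then pvFence rest
    else l :: pvVis rest
  termination_by ls => ls.length
  decreasing_by
    · simp only [List.length_cons]; have := pvSkipEnd_le rest; omega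
    · simp only [List.length_cons]; omega
    · simp only [List.length_cons]; omega
    · simp only [List.length_cons]; omega
-- fence mode (B's inner while loop)
def pvFence : List String → List String
  | [] => []
  | l :: rest =>
    if PySem.Str.strip l = "<!-- DEVCOV:BEGIN -->" then pvFence (pvSkipEnd rest)
    else if PySem.Str.startswith (PySem.Str.strip l) "```" then pvVis rest
    else pvFence rest
  termination_by ls => ls.length
  decreasing_by
    · simp only [List.length_cons]; have := pvSkipEnd_le rest; omega
    · simp only [List.length_cons]; omega
    · simp only [List.length_cons]; omega
end

def visible_changelog_lines_py_alt (changelog_text : String) : List String :=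
  let start := PySem.Str.find changelog_text "## Log changes here"
  let content := if start ≥ 0 then PySem.Str.slice changelog_text (some start) none else changelog_text
  pvVis (PySem.Str.splitlines content)

-- ===== PRECONDITION & SPEC =====
def Spec_visible_changelog_lines_py (changelog_text : String) (out : List String) : Prop := out = visible_changelog_lines_py_alt changelog_text
instance (changelog_text : String) (out : List String) : Decidable (Spec_visible_changelog_lines_py changelog_text out) := by unfold Spec_visible_changelog_lines_py; infer_instance

-- ===== CLAIM (what is proved, stated in full; the proofs are below) =====
def Claim_equal_visible_changelog_lines_py : Prop := ∀ (changelog_text : String), Dom_visible_changelog_lines_py changelog_text → Spec_visible_changelog_lines_py changelog_text (visible_changelog_lines_py changelog_text)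

-- ===== LEMMAS AND PROOFS =====

-- in managed state, A's loop just scans to the END marker
theorem pv_managed (ls : List String) (f : Bool) (acc : List String) :
    (ls.foldl pvStepA (true, f, acc)).2.2 = ((pvSkipEnd ls).foldl pvStepA (false, f, acc)).2.2 := by
  induction ls with
  | nil => simp [pvSkipEnd]
  | cons l rest ih =>
    simp only [List.foldl_cons, pvSkipEnd]
    by_cases h2 : PySem.Str.strip l = "<!-- DEVCOV:END -->"
    · have h1 : ¬ PySem.Str.strip l = "<!-- DEVCOV:BEGIN -->" := by rw [h2]; decide
      simp [pvStepA, h2]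
    · by_cases h1 : PySem.Str.strip l = "<!-- DEVCOV:BEGIN -->"
      · simp only [pvStepA, h1, if_true]
        exact ih
      · simp only [pvStepA, h1, h2, if_false, if_true]
        exact ih

-- A's loop from the two unmanaged states computes pvVis / pvFence
theorem pv_main (n : Nat) : ∀ (ls : List String), ls.length ≤ n → ∀ (acc : List String),
    (ls.foldl pvStepA (false, false, acc)).2.2 = acc ++ pvVis ls ∧
    (ls.foldl pvStepA (false, true, acc)).2.2 = acc ++ pvFence ls := by
  induction n with
  | zero =>
    intro ls hls acc
    have h : ls = [] := List.eq_nil_of_length_eq_zero (Nat.le_zero.mp hls)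
    subst h
    simp [pvVis, pvFence]
  | succ n ih =>
    intro ls hls acc
    cases ls with
    | nil => simp [pvVis, pvFence]
    | cons l rest =>
      simp only [List.length_cons, Nat.succ_le_succ_iff] at hls
      by_cases h1 : PySem.Str.strip l = "<!-- DEVCOV:BEGIN -->"
      · have hle : (pvSkipEnd rest).length ≤ n := le_trans (pvSkipEnd_le rest) hls
        have eV : pvVis (l :: rest) = pvVis (pvSkipEnd rest) := by rw [pvVis, if_pos h1]
        have eF : pvFence (l :: rest) = pvFence (pvSkipEnd rest) := by rw [pvFence, if_pos h1]
        simp only [List.foldl_cons, pvStepA, h1, eV, eF]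
        exact ⟨(pv_managed rest false acc).trans (ih _ hle acc).1,
               (pv_managed rest true acc).trans (ih _ hle acc).2⟩
      · by_cases h2 : PySem.Str.strip l = "<!-- DEVCOV:END -->"
        · have h3 : ¬ PySem.Str.startswith (PySem.Str.strip l) "```" = true := by rw [h2]; decide
          have eV : pvVis (l :: rest) = pvVis rest := by rw [pvVis, if_neg h1, if_pos h2]
          have eF : pvFence (l :: rest) = pvFence rest := by rw [pvFence, if_neg h1, if_neg h3]
          simp only [List.foldl_cons, pvStepA, h2, eV, eF]
          exact ⟨(ih rest hls acc).1, (ih rest hls acc).2⟩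
        · by_cases h3 : PySem.Str.startswith (PySem.Str.strip l) "```" = true
          · have eV : pvVis (l :: rest) = pvFence rest := by rw [pvVis, if_neg h1, if_neg h2, if_pos h3]
            have eF : pvFence (l :: rest) = pvVis rest := by rw [pvFence, if_neg h1, if_pos h3]
            simp only [List.foldl_cons, pvStepA, h1, h2, h3, if_true, if_false, eV, eF]
            exact ⟨(ih rest hls acc).2, (ih rest hls acc).1⟩
          · have eV : pvVis (l :: rest) = l :: pvVis rest := by rw [pvVis, if_neg h1, if_neg h2, if_neg h3]
            have eF : pvFence (l :: rest) = pvFence rest := by rw [pvFence, if_neg h1, if_neg h3]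
            simp only [List.foldl_cons, pvStepA, h1, h2, h3, if_false, Bool.false_eq_true, if_true, eV, eF]
            constructor
            · rw [(ih rest hls (acc ++ [l])).1]
              simp
            · exact (ih rest hls acc).2

-- ===== VERDICT (by name: the statement is the Claim_ definition above) =====
theorem visible_changelog_lines_py_spec : Claim_equal_visible_changelog_lines_py := by
  intro t _
  unfold Spec_visible_changelog_lines_py visible_changelog_lines_py visible_changelog_lines_py_alt
  exact ((pv_main _ _ le_rfl []).1)
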